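-- pv_equiv track=rewrite | github.com/d1scordeon/TZI_lab4 | test.py | embed_message
-- ===== SOURCE A (Python) =====
-- def embed_message(container, binary_message):
--     result = ""
--     index = 0
--     for char in container:
--         if char == ' ' and index < len(binary_message):
--             result += ' ' if binary_message[index] == '0' else '  '
--             index += 1
--         else:
--             result += char
--     return result
-- ===== SOURCE B (Python) =====
-- def embed_message(container, binary_message):
--     tokens = container.split(' ')
--     parts = [tokens[0]]
--     for i in range(len(tokens) - 1):
--         if i < len(binary_message):
--             parts.append(' ' if binary_message[i] == '0' else '  ')
--         else:
--             parts.append(' ')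
--         parts.append(tokens[i + 1])
--     return ''.join(parts)
-- ===== Notes on version B (the rewrite author's own statement) =====
-- stated objective: alternative
-- what changed: Replaced A's per-character scan with a running bit index by split-on-space into tokens and a single join that interleaves tokens with encoded separators indexed by gap position.
import Mathlib
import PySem

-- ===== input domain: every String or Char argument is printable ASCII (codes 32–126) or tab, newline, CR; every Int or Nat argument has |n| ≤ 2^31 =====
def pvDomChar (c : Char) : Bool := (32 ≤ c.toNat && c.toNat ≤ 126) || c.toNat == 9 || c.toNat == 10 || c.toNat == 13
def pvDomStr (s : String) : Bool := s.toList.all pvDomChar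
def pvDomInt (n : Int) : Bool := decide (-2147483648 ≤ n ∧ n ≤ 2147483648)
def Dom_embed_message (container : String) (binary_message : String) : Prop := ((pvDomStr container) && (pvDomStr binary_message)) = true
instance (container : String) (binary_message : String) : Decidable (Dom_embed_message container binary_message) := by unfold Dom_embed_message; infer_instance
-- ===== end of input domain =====

-- B replaces A's per-character scan/accumulator with split-on-space then an
-- indexed interleave of tokens and encoded separators (objective: alternative).


-- ===== PORT A =====
-- A's for-loop over the container's characters, carrying (result, index).
def embedScanA (bm : List Char) : List Char → List Char → Nat → List Char
  | [], res, _ => res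
  | c :: cs, res, i =>
      if c = ' ' ∧ i < bm.length then
        embedScanA bm cs (res ++ (if bm[i]? = some '0' then [' '] else [' ', ' '])) (i + 1)
      else
        embedScanA bm cs (res ++ [c]) i

def embed_message (container : String) (binary_message : String) : String :=
  String.ofList (embedScanA binary_message.toList container.toList [] 0)

-- ===== PORT B =====
-- separator for gap i: encoded space while bits remain, plain space afterwards
def sepB (bm : List Char) (i : Nat) : List Char :=
  if i < bm.length then (if bm[i]? = some '0' then [' '] else [' ', ' ']) else [' ']

-- Source B's join of parts: tokens[0], then for each gap i the separator and tokens[i+1]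
def glueB (bm : List Char) : Nat → List (List Char) → List Char
  | _, [] => []
  | _, [t] => t
  | i, t :: ts => t ++ sepB bm i ++ glueB bm (i + 1) ts

def embed_message_alt (container : String) (binary_message : String) : String :=
  String.ofList (glueB binary_message.toList 0 (container.toList.splitOn ' '))

-- ===== PRECONDITION & SPEC =====
def Spec_embed_message (container : String) (binary_message : String) (out : String) : Prop := out = embed_message_alt container binary_message
instance (container : String) (binary_message : String) (out : String) : Decidable (Spec_embed_message container binary_message out) := by unfold Spec_embed_message; infer_instance

-- ===== CLAIM (what is proved, stated in full; the proofs are below) =====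
def Claim_equal_embed_message : Prop := ∀ (container : String) (binary_message : String), Dom_embed_message container binary_message → Spec_embed_message container binary_message (embed_message container binary_message)

-- ===== LEMMAS AND PROOFS =====

theorem embedScanA_acc (bm : List Char) (cs : List Char) (res : List Char) (i : Nat) :
    embedScanA bm cs res i = res ++ embedScanA bm cs [] i := by
  induction cs generalizing res i with
  | nil => simp [embedScanA]
  | cons c cs ih =>
    simp only [embedScanA]
    split_ifs <;> (rw [ih, ih ([] ++ _)]; simp)

theorem splitOn_space_exists_cons (cs : List Char) :
    ∃ t ts, cs.splitOn ' ' = t :: ts := by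
  cases h : cs.splitOn ' ' with
  | nil => exact absurd h (List.splitOnP_ne_nil _ _)
  | cons t ts => exact ⟨t, ts, rfl⟩

theorem glueB_modifyHead (bm : List Char) (j : Nat) (c : Char) (t : List Char)
    (ts : List (List Char)) :
    glueB bm j (List.modifyHead (List.cons c) (t :: ts)) = c :: glueB bm j (t :: ts) := by
  cases ts with
  | nil => simp [glueB]
  | cons t' ts' => simp [glueB]

theorem scan_eq_glue (bm : List Char) (cs : List Char) (i j : Nat)
    (hij : i = j ∨ (bm.length ≤ i ∧ bm.length ≤ j)) :
    embedScanA bm cs [] i = glueB bm j (cs.splitOn ' ') := by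
  induction cs generalizing i j with
  | nil => simp [embedScanA, List.splitOn_nil, glueB]
  | cons c cs ih =>
    have hsplit : (c :: cs).splitOn ' ' =
        if c = ' ' then [] :: cs.splitOn ' '
        else List.modifyHead (List.cons c) (cs.splitOn ' ') := by
      simp [List.splitOn, List.splitOnP_cons]
    obtain ⟨t, ts, hts⟩ := splitOn_space_exists_cons cs
    by_cases hc : c = ' '
    · subst hc
      rw [hsplit, if_pos rfl, hts]
      by_cases hi : i < bm.length
      · -- a space carrying a bit; here i = j necessarily
        have hj : i = j := by
          rcases hij with h | ⟨h1, _⟩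
          · exact h
          · omega
        subst hj
        simp only [embedScanA, true_and, if_pos hi]
        rw [embedScanA_acc, ih (i + 1) (i + 1) (Or.inl rfl), hts]
        simp [glueB, sepB, hi]
      · -- a space past the message: both sides emit a plain space
        have hj : bm.length ≤ j := by
          rcases hij with h | ⟨_, h2⟩
          · omega
          · exact h2
        simp only [embedScanA, true_and, if_neg hi]
        rw [embedScanA_acc, ih i (j + 1) (Or.inr ⟨by omega, by omega⟩), hts]
        simp [glueB, sepB, Nat.not_lt.2 hj]
    · -- an ordinary character: prepended to the head token
      rw [hsplit, if_neg hc, hts, glueB_modifyHead, ← hts]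
      have hc' : ¬ (c = ' ' ∧ i < bm.length) := by
        simp [hc]
      simp only [embedScanA, if_neg hc']
      rw [embedScanA_acc, ih i j hij]
      simp

-- ===== VERDICT (by name: the statement is the Claim_ definition above) =====
theorem embed_message_spec : Claim_equal_embed_message := by
  intro container binary_message _
  unfold Spec_embed_message embed_message embed_message_alt
  rw [scan_eq_glue _ _ 0 0 (Or.inl rfl)]
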